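-- pv_equiv track=rewrite | github.com/fqf2009/LeetCode | leetcode/lc0568_MaximumVacationDays.py | maxVacationDays
-- ===== SOURCE A (Python) =====
-- from functools import cache
-- from typing import List
--
-- def maxVacationDays(flights: List[List[int]], days: List[List[int]]) -> int:
--     n, k = len(flights), len(days[0])
--
--     @cache
--     def dfs(city, week) -> int:
--         if week == k:
--             return 0
--         res = 0
--         for i in range(n):
--             if i == city or flights[city][i] == 1:  # stay in city_i or fly to city_i
--                 res = max(res, days[i][week] + dfs(i, week + 1))
--         return res
--
--     return dfs(0, 0)
-- ===== SOURCE B (Python) =====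
-- def maxVacationDays(flights, days):
--     # Bottom-up tabulation instead of memoized recursion.
--     n, k = len(flights), len(days[0])
--     if n == 0:
--         return 0  # no cities, no vacation days
--     dp = [0] * n  # vacation days obtainable from week k onward: all zero
--     for week in range(k - 1, -1, -1):
--         dp = [max([0] + [days[i][week] + dp[i]
--                          for i in range(n) if i == c or flights[c][i] == 1])
--               for c in range(n)]
--     return dp[0]
-- ===== Notes on version B (the rewrite author's own statement) =====
-- stated objective: alternative
-- what changed: Replaces the top-down @cache recursion with bottom-up tabulation: a dp vector of per-city values is rolled backwards over the weeks; B evaluates all n*k states iteratively, A only the states reachable from city 0.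
-- outside the precondition, e.g. on maxVacationDays([[0, 0], []], [[5], [3]]): A returns 5, B raises IndexError; on maxVacationDays([[0, 0], [1]], [[5], [3]]): A returns 5, B returns 5
import Mathlib
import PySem

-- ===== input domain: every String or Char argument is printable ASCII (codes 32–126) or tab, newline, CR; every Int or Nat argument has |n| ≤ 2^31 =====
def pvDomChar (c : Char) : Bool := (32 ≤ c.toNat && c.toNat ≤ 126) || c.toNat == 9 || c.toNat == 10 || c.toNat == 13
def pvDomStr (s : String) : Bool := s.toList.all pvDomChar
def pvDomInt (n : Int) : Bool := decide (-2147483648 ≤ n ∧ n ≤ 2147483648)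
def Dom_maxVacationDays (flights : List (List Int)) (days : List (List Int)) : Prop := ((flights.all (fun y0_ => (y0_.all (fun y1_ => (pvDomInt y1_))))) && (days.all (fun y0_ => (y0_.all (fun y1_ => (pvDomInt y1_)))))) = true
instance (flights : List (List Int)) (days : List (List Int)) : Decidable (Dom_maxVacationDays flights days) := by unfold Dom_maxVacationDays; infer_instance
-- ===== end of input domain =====

-- B replaces A's top-down memoized recursion by bottom-up tabulation over the weeks: an iterative dp vector rolled backwards (no recursion, O(n) space); it evaluates all states, A only the reachable ones.
-- Pre_ admits empty flights, zero weeks, and inputs whose rows are long enough for full n x k indexing; it excludes empty days (A raises) and ragged inputs, on which A raises unless the short rows are unreachable from city 0 (see the Pre_ comment and cites).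


-- ===== PORT A =====
-- dfs(city, week) ported by structural recursion on r = k - week (the number of
-- remaining weeks); week == k becomes r = 0, week = k - r otherwise.
def dfsA (flights days : List (List Int)) (n : Int) (k : Nat) : Nat → Int → Int
  | 0, _ => 0
  | r + 1, city =>
      (PySem.List.pyRange 0 n 1).foldl
        (fun res i =>
          if i == city || PySem.List.pyGetD (PySem.List.pyGetD flights city []) i 0 == 1 then
            max res (PySem.List.pyGetD (PySem.List.pyGetD days i []) ((k - (r + 1) : Nat) : Int) 0
                      + dfsA flights days n k r i)
          else res) 0

def maxVacationDays (flights : List (List Int)) (days : List (List Int)) : Int :=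
  let n : Int := PySem.List.len flights
  let k : Nat := (PySem.List.pyGetD days 0 []).length
  dfsA flights days n k k 0

-- ===== PORT B =====
-- one week of the tabulation: new dp from old dp (max([0] + [...]) is the foldl max 0 of the comprehension)
def stepB (flights days : List (List Int)) (n : Nat) (dp : List Int) (week : Nat) : List Int :=
  (List.range n).map (fun c =>
    ((List.range n).filterMap (fun i =>
        if i == c || (flights.getD c []).getD i 0 == 1 then
          some ((days.getD i []).getD week 0 + dp.getD i 0)
        else none)).foldl max 0)

def maxVacationDays_alt (flights : List (List Int)) (days : List (List Int)) : Int :=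
  let n : Nat := flights.length
  let k : Nat := days.headI.length
  if n = 0 then 0    -- no cities, no vacation days
  else
    let dp := ((List.range k).reverse).foldl (stepB flights days n) (List.replicate n 0)
    dp.getD 0 0

-- ===== PRECONDITION & SPEC =====
-- Pre_ excludes empty days (A raises IndexError on days[0]) and, when n > 0 and k > 0,
-- ragged inputs with rows too short for full n x k indexing: there A raises IndexError,
-- except when the short rows belong to cities unreachable from city 0: there A still
-- returns (an accident of reachability), while B, which tabulates every city, either
-- raises on the short row or returns the same value; equality is only claimed on Pre_.
def Pre_maxVacationDays (flights : List (List Int)) (days : List (List Int)) : Prop :=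
  days ≠ [] ∧
  (flights = [] ∨ days.headI = [] ∨
    (flights.length ≤ days.length ∧
     (∀ r ∈ flights, flights.length ≤ r.length) ∧
     (∀ r ∈ days.take flights.length, days.headI.length ≤ r.length)))
instance (flights : List (List Int)) (days : List (List Int)) : Decidable (Pre_maxVacationDays flights days) := by unfold Pre_maxVacationDays; infer_instance

def pvWitness_maxVacationDays : List (List Int) × List (List Int) :=
  ([[0, 1], [1, 0]], [[1, 3], [6, 0]])

def Spec_maxVacationDays (flights : List (List Int)) (days : List (List Int)) (out : Int) : Prop := out = maxVacationDays_alt flights days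
instance (flights : List (List Int)) (days : List (List Int)) (out : Int) : Decidable (Spec_maxVacationDays flights days out) := by unfold Spec_maxVacationDays; infer_instance

-- ===== CLAIM (what is proved, stated in full; the proofs are below) =====
def Claim_equal_maxVacationDays : Prop := ∀ (flights : List (List Int)) (days : List (List Int)), Dom_maxVacationDays flights days → Pre_maxVacationDays flights days → Spec_maxVacationDays flights days (maxVacationDays flights days)

-- ===== LEMMAS AND PROOFS =====

-- a guarded running-max loop equals max-fold over the filtered comprehension
theorem foldl_ite_max_eq_filterMap (l : List Nat) (P : Nat → Bool) (v : Nat → Int) (acc : Int) :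
    l.foldl (fun res i => if P i then max res (v i) else res) acc
      = (l.filterMap (fun i => if P i then some (v i) else none)).foldl max acc := by
  induction l generalizing acc with
  | nil => rfl
  | cons x t ih =>
      by_cases h : P x = true
      · simp [List.foldl, h, ih]
      · simp at h; simp [List.foldl, h, ih]

-- the core invariant: A's dfs with r weeks remaining equals entry c of B's dp after
-- the last r weeks have been tabulated
theorem dfs_eq_dp (flights days : List (List Int)) (r : Nat) (c : Nat)
    (hr : r ≤ days.headI.length) (hc : c < flights.length) :
    dfsA flights days (flights.length : Int) days.headI.length r (c : Int)
      = (List.foldr (fun w dp => stepB flights days flights.length dp w)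
          (List.replicate flights.length 0)
          (List.range' (days.headI.length - r) r)).getD c 0 := by
  induction r generalizing c with
  | zero => simp [dfsA]
  | succ r ih =>
      set n := flights.length with hn
      set k := days.headI.length with hk
      have hsplit : List.range' (k - (r + 1)) (r + 1)
          = (k - (r + 1)) :: List.range' (k - r) r := by
        have : k - (r + 1) + 1 = k - r := by omega
        rw [List.range'_succ, this]
      rw [hsplit]
      simp only [List.foldr_cons]
      set dpR := List.foldr (fun w dp => stepB flights days n dp w)
          (List.replicate n 0) (List.range' (k - r) r) with hdp
      -- reduce RHS: entry c of the mapped list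
      have hrhs : (stepB flights days n dpR (k - (r + 1))).getD c 0
          = ((List.range n).filterMap (fun i =>
              if i == c || (flights.getD c []).getD i 0 == 1 then
                some ((days.getD i []).getD (k - (r + 1)) 0 + dpR.getD i 0)
              else none)).foldl max 0 := by
        unfold stepB
        rw [List.getD_eq_getElem _ _ (by simpa using hc)]
        simp
      rw [hrhs]
      -- reduce LHS: unfold one step of dfsA and push the range/index casts
      show (PySem.List.pyRange 0 (n : Int) 1).foldl
        (fun res i =>
          if i == (c : Int) || PySem.List.pyGetD (PySem.List.pyGetD flights (c : Int) []) i 0 == 1 then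
            max res (PySem.List.pyGetD (PySem.List.pyGetD days i []) ((k - (r + 1) : Nat) : Int) 0
                      + dfsA flights days (n : Int) k r i)
          else res) 0 = _
      rw [PySem.List.pyRange_zero_natCast, List.foldl_map]
      rw [← foldl_ite_max_eq_filterMap (List.range n)
        (fun i => i == c || (flights.getD c []).getD i 0 == 1)
        (fun i => (days.getD i []).getD (k - (r + 1)) 0 + dpR.getD i 0) 0]
      refine PySem.List.foldl_congr_mem _ _ _ _ ?_
      intro acc i hi
      have hin : i < n := by simpa using hi
      have hcond : (((i : Int) == (c : Int))
            || PySem.List.pyGetD (PySem.List.pyGetD flights (c : Int) []) (i : Int) 0 == 1)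
          = ((i == c) || (flights.getD c []).getD i 0 == 1) := by
        simp only [PySem.List.pyGetD_natCast]
        by_cases h : i = c
        · simp [h]
        · have h1 : (((i : Int)) == ((c : Int))) = false := by
            simpa [Int.natCast_inj] using h
          have h2 : (i == c) = false := by simpa using h
          rw [h1, h2]
      rw [hcond]
      by_cases hP : ((i == c) || (flights.getD c []).getD i 0 == 1) = true
      · simp [PySem.List.pyGetD_natCast, List.getD, ih i (by omega) hin]
      · simp at hP
        simp [hP]

-- with no cities (n = 0) A's loop body is empty at every level and dfs returns 0
theorem dfsA_zero_cities (flights days : List (List Int)) (k r : Nat) (city : Int) :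
    dfsA flights days 0 k r city = 0 := by
  cases r with
  | zero => rfl
  | succ r => simp [dfsA]

-- ===== VERDICT (by name: the statement is the Claim_ definition above) =====
theorem maxVacationDays_spec : Claim_equal_maxVacationDays := by
  intro flights days _ hpre
  obtain ⟨hne, -⟩ := hpre
  unfold Spec_maxVacationDays maxVacationDays maxVacationDays_alt
  have hk : (PySem.List.pyGetD days 0 []).length = days.headI.length := by
    cases days with
    | nil => cases hne rfl
    | cons d t => simp [PySem.List.pyGetD_zero]
  by_cases hf : flights.length = 0
  · simp only [PySem.List.len_eq, hf, Int.natCast_zero]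
    exact dfsA_zero_cities flights days _ _ _
  · have hn1 : 0 < flights.length := Nat.pos_of_ne_zero hf
    have h0 : dfsA flights days (flights.length : Int) days.headI.length days.headI.length ((0 : Nat) : Int)
        = (List.foldr (fun w dp => stepB flights days flights.length dp w)
            (List.replicate flights.length 0)
            (List.range' 0 days.headI.length)).getD 0 0 := by
      simpa using dfs_eq_dp flights days days.headI.length 0 le_rfl hn1
    simp only [PySem.List.len_eq, hk, if_neg hf]
    rw [List.foldl_reverse]
    have hrange : List.range days.headI.length = List.range' 0 days.headI.length :=
      List.range_eq_range'
    rw [hrange]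
    simpa using h0
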